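-- pv_equiv track=rewrite | github.com/mmishra4/DSA | MinMaxarr.py | MakeEleMax
-- ===== SOURCE A (Python) =====
-- def MakeEleMax(A,B):
--     N = len(A)
--     cnt = 0
--     if B in A:
--         for i in range(N-1, -1, -1):
--             if A[i] > B:
--                 cnt+=1
--         return cnt
--     else:
--         return -1
-- ===== SOURCE B (Python) =====
-- def MakeEleMax(A, B):
--     s = sorted(A)
--     lo, hi = 0, len(s)
--     while lo < hi:
--         mid = (lo + hi) // 2
--         if s[mid] <= B:
--             lo = mid + 1
--         else:
--             hi = mid
--     if lo > 0 and s[lo - 1] == B: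
--         return len(s) - lo
--     return -1
-- ===== Notes on version B (the rewrite author's own statement) =====
-- stated objective: alternative
-- what changed: Replaces the linear membership test and reverse counting loop with sort-then-binary-search: sort A, binary-search the rightmost insertion point of B, decide presence by inspecting the element before that point and compute the count as length minus the insertion point.
import Mathlib
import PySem

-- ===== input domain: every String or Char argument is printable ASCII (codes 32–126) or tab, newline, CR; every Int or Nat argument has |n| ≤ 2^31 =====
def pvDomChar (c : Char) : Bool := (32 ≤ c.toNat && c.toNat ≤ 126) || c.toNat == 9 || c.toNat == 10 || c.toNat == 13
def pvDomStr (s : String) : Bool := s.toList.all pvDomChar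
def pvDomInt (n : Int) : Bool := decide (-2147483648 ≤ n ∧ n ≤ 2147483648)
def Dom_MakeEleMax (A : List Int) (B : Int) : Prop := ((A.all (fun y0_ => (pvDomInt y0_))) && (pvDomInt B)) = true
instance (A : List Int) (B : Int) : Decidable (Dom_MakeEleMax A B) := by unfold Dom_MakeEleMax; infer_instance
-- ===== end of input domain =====

-- B: sort A and hand-rolled binary search for the rightmost insertion point of B, instead of a
-- membership scan plus a reverse counting loop (alternative algorithm; not claimed faster).

-- ===== PORT A =====
def MakeEleMax (A : List Int) (B : Int) : Int :=
  let N : Int := A.length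
  let cnt : Int := 0
  if A.contains B then
    -- for i in range(N-1, -1, -1): if A[i] > B: cnt += 1   (index always in range, default unused)
    (PySem.List.pyRange (N - 1) (-1) (-1)).foldl
      (fun cnt i => if PySem.List.pyGetD A i 0 > B then cnt + 1 else cnt) cnt
  else -1

-- ===== PORT B =====
-- the while-loop of Source B: lo, hi shrink until lo = hi = rightmost insertion point of B in s
def pvBsearch (s : List Int) (B : Int) (lo hi : Int) : Int :=
  if h : lo < hi then
    let mid := PySem.Int.floordiv (lo + hi) 2
    if PySem.List.pyGetD s mid 0 ≤ B then pvBsearch s B (mid + 1) hi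
    else pvBsearch s B lo mid
  else lo
termination_by (hi - lo).toNat
decreasing_by
  · have hb1 := (PySem.Int.floordiv_two_mid_bounds (lo := lo) (hi := hi) (le_of_lt h)).1
    omega
  · have hlt : PySem.Int.floordiv (lo + hi) 2 < hi :=
      (PySem.Int.floordiv_lt_iff_lt_mul (by omega)).mpr (by omega)
    omega

def MakeEleMax_alt (A : List Int) (B : Int) : Int :=
  let s := PySem.List.sorted A (fun x => x) false
  let lo := pvBsearch s B 0 (s.length : Int)
  if 0 < lo ∧ PySem.List.pyGetD s (lo - 1) 0 = B then (s.length : Int) - lo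
  else -1

-- ===== PRECONDITION & SPEC =====
def Spec_MakeEleMax (A : List Int) (B : Int) (out : Int) : Prop := out = MakeEleMax_alt A B
instance (A : List Int) (B : Int) (out : Int) : Decidable (Spec_MakeEleMax A B out) := by unfold Spec_MakeEleMax; infer_instance

-- ===== CLAIM (what is proved, stated in full; the proofs are below) =====
def Claim_equal_MakeEleMax : Prop := ∀ (A : List Int) (B : Int), Dom_MakeEleMax A B → Spec_MakeEleMax A B (MakeEleMax A B)

-- ===== LEMMAS AND PROOFS =====

-- A's reverse counting loop computes the number of elements strictly greater than B
theorem countA_eq (A : List Int) (B : Int) (c : Int) :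
    (PySem.List.pyRange ((A.length : Int) - 1) (-1) (-1)).foldl
      (fun cnt i => if PySem.List.pyGetD A i 0 > B then cnt + 1 else cnt) c
    = c + (A.countP (fun x => decide (x > B)) : Int) := by
  have h1 : PySem.List.pyRange ((A.length : Int) - 1) (-1) (-1)
      = (PySem.List.pyRange 0 (A.length : Int) 1).reverse := by
    simpa using PySem.List.pyRange_neg_one_eq_reverse ((A.length : Int) - 1) (-1)
  have h3 := PySem.List.foldl_count_if (fun i => decide (PySem.List.pyGetD A i 0 > B))
    ((PySem.List.pyRange 0 (A.length : Int) 1).reverse) c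
  simp only [decide_eq_true_eq] at h3
  rw [h1, h3, List.countP_reverse]
  have h2 : List.countP (fun i => decide (PySem.List.pyGetD A i 0 > B))
      (PySem.List.pyRange 0 (A.length : Int) 1)
      = A.countP (fun x => decide (x > B)) := by
    conv_rhs => rw [← PySem.List.map_pyGetD_pyRange_zero' A 0]
    rw [List.countP_map]
    rfl
  rw [h2]

-- binary-search correctness: the result r keeps the invariant 'everything left of r is ≤ B,
-- everything from r on is > B'
theorem pvBsearch_spec (s : List Int) (B : Int)
    (hs : s.Pairwise (fun a b => a ≤ b)) :
    ∀ (n : Nat) (lo hi : Int), (hi - lo).toNat = n →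
    0 ≤ lo → lo ≤ hi → hi ≤ (s.length : Int) →
    (∀ (i : Nat) (h : i < s.length), (i : Int) < lo → s[i] ≤ B) →
    (∀ (i : Nat) (h : i < s.length), hi ≤ (i : Int) → B < s[i]) →
    0 ≤ pvBsearch s B lo hi ∧ pvBsearch s B lo hi ≤ (s.length : Int) ∧
    (∀ (i : Nat) (h : i < s.length), (i : Int) < pvBsearch s B lo hi → s[i] ≤ B) ∧
    (∀ (i : Nat) (h : i < s.length), pvBsearch s B lo hi ≤ (i : Int) → B < s[i]) := by
  intro n
  induction n using Nat.strong_induction_on with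
  | _ n ih =>
    intro lo hi hn h0 hlh hhl hL hR
    rw [pvBsearch]
    by_cases h : lo < hi
    · simp only [h, dif_pos]
      have hb := PySem.Int.floordiv_two_mid_bounds (lo := lo) (hi := hi) (le_of_lt h)
      have hlt : PySem.Int.floordiv (lo + hi) 2 < hi :=
        (PySem.Int.floordiv_lt_iff_lt_mul (by omega)).mpr (by omega)
      set mid := PySem.Int.floordiv (lo + hi) 2 with hmid
      have hmlen : mid < (s.length : Int) := by omega
      have hget : PySem.List.pyGetD s mid 0 = s[mid.toNat]'(by omega) :=
        PySem.List.pyGetD_eq_getElem (i := mid) s 0 (by omega) (by omega)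
      have hpw := List.pairwise_iff_getElem.mp hs
      by_cases hc : PySem.List.pyGetD s mid 0 ≤ B
      · simp only [hc, if_pos]
        refine ih (hi - (mid + 1)).toNat (by omega) (mid + 1) hi rfl (by omega) (by omega) hhl
          ?_ hR
        intro i hilen hi1
        by_cases hie : i = mid.toNat
        · subst hie; rw [hget] at hc; exact hc
        · have : (i : Int) < mid := by omega
          have := hpw i mid.toNat hilen (by omega) (by omega)
          rw [hget] at hc; omega
      · simp only [hc, if_neg, not_false_iff]
        refine ih (mid - lo).toNat (by omega) lo mid rfl h0 (by omega) (by omega) hL ?_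
        intro i hilen hmi
        have hmB : B < s[mid.toNat]'(by omega) := by rw [hget] at hc; omega
        by_cases hie : i = mid.toNat
        · subst hie; exact hmB
        · have := hpw mid.toNat i (by omega) hilen (by omega)
          omega
    · simp only [h, dif_neg, not_false_iff]
      constructor
      · omega
      refine ⟨by omega, hL, ?_⟩
      intro i hilen hri
      exact hR i hilen (by omega)

-- count over a list whose predicate holds exactly from index r on
theorem countP_of_index_split (s : List Int) (p : Int → Bool) (r : Nat) (hr : r ≤ s.length)
    (h : ∀ (i : Nat) (hi : i < s.length), p s[i] = true ↔ r ≤ i) :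
    s.countP p = s.length - r := by
  conv_lhs => rw [← List.take_append_drop r s, List.countP_append]
  have h1 : (s.take r).countP p = 0 := by
    rw [List.countP_eq_zero]
    intro a ha
    obtain ⟨i, hi, hia⟩ := List.mem_iff_getElem.mp ha
    rw [List.getElem_take] at hia
    rw [List.length_take] at hi
    intro hp
    rw [← hia] at hp
    have := (h i (by omega)).mp hp
    omega
  have h2 : (s.drop r).countP p = s.length - r := by
    rw [List.countP_eq_length.mpr, List.length_drop]
    intro a ha
    obtain ⟨i, hi, hia⟩ := List.mem_iff_getElem.mp ha
    rw [List.getElem_drop] at hia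
    have hil : r + i < s.length := by
      rw [List.length_drop] at hi; omega
    rw [← hia]
    exact (h (r + i) hil).mpr (by omega)
  omega

-- ===== VERDICT (by name: the statement is the Claim_ definition above) =====
theorem MakeEleMax_spec : Claim_equal_MakeEleMax := by
  intro A B _
  unfold Spec_MakeEleMax MakeEleMax MakeEleMax_alt
  set s := PySem.List.sorted A (fun x => x) false with hsdef
  have hperm : s.Perm A := PySem.List.sorted_perm A (fun x => x) false
  have hs : s.Pairwise (fun a b => a ≤ b) := by
    have := PySem.List.sorted_pairwise (xs := A) (key := fun x => x)
    simpa using this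
  set r := pvBsearch s B 0 (s.length : Int) with hrdef
  obtain ⟨hr0, hrlen, hLeft, hRight⟩ :=
    pvBsearch_spec s B hs (((s.length : Int) - 0).toNat) 0 (s.length : Int) rfl
      (le_refl 0) (by positivity) (le_refl _)
      (by intro i h hi; omega) (by intro i h hi; omega)
  have hcount : (A.countP (fun x => decide (x > B)) : Int) = (s.length : Int) - r := by
    have hperm' : A.countP (fun x => decide (x > B)) = s.countP (fun x => decide (x > B)) :=
      (hperm.countP_eq _).symm
    have := countP_of_index_split s (fun x => decide (x > B)) r.toNat (by omega) ?_
    · have hlen : s.length = A.length := hperm.length_eq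
      omega
    · intro i hi
      simp only [decide_eq_true_eq]
      constructor
      · intro hp
        by_contra hlt
        have := hLeft i hi (by omega)
        omega
      · intro hp
        exact hRight i hi (by omega)
  by_cases hmem : B ∈ A
  · have hmemS : B ∈ s := hperm.mem_iff.mpr hmem
    obtain ⟨j, hj, hjB⟩ := List.mem_iff_getElem.mp hmemS
    have hjr : (j : Int) < r := by
      by_contra hge
      have := hRight j hj (by omega)
      omega
    have hr0' : 0 < r := by omega
    have hprev : s[(r - 1).toNat]'(by omega) = B := by
      have hle : s[(r - 1).toNat]'(by omega) ≤ B := hLeft (r - 1).toNat (by omega) (by omega)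
      have hge : B ≤ s[(r - 1).toNat]'(by omega) := by
        by_cases hje : j = (r - 1).toNat
        · simp only [hje] at hjB
          exact hjB.ge
        · have := List.pairwise_iff_getElem.mp hs j (r - 1).toNat hj (by omega) (by omega)
          omega
      omega
    have hgetprev : PySem.List.pyGetD s (r - 1) 0 = B := by
      rw [PySem.List.pyGetD_eq_getElem (i := r - 1) s 0 (by omega) (by omega)]
      exact hprev
    have hcontains : A.contains B = true := by simpa using hmem
    rw [if_pos hcontains, if_pos ⟨hr0', hgetprev⟩, countA_eq]
    omega
  · have hcontains : A.contains B = false := by simpa using hmem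
    rw [if_neg (by simpa using hmem), if_neg]
    rintro ⟨hpos, heq⟩
    apply hmem
    apply hperm.mem_iff.mp
    rw [PySem.List.pyGetD_eq_getElem (i := r - 1) s 0 (by omega) (by omega)] at heq
    rw [← heq]
    exact List.getElem_mem _
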